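-- pv_equiv track=rewrite | github.com/aws-samples/sample-bedrock-migration-and-modernization-tools | bedrock-model-profiler/collectors/model-collector/src/utils/pricing_integrator.py | _providers_match
-- ===== SOURCE A (Python) =====
-- def _providers_match(model_provider: str, pricing_provider: str) -> bool:
--     """Check if providers match (with some flexibility)"""
--     if model_provider == pricing_provider:
--         return True
--
--     # Handle provider variations
--     provider_aliases = {
--         'amazon': ['amazon', 'aws'],
--         'anthropic': ['anthropic'],
--         'meta': ['meta', 'facebook'],
--         'cohere': ['cohere'],
--         'mistral': ['mistral', 'mistralai', 'mistral ai'],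
--         'stability': ['stability', 'stabilityai', 'stable', 'stability ai'],
--         'luma': ['luma', 'lumaai', 'luma ai'],
--         'ai21': ['ai21', 'ai21labs', 'ai21 labs'],
--         'twelvelabs': ['twelvelabs', 'twelve labs', 'twelvelabs'],
--         'qwen': ['qwen'],
--         'deepseek': ['deepseek'],
--         'openai': ['openai'],
--         'writer': ['writer']
--     }
--
--     for canonical, aliases in provider_aliases.items():
--         if model_provider in aliases and pricing_provider in aliases:
--             return True
--
--     return False
-- ===== SOURCE B (Python) =====
-- # Flat reverse index: alias -> canonical provider; equivalence = both aliases
-- # resolve to the same canonical name (plus the exact-equality fast path).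
-- _ALIAS_TO_CANONICAL = {
--     'amazon': 'amazon', 'aws': 'amazon',
--     'anthropic': 'anthropic',
--     'meta': 'meta', 'facebook': 'meta',
--     'cohere': 'cohere',
--     'mistral': 'mistral', 'mistralai': 'mistral', 'mistral ai': 'mistral',
--     'stability': 'stability', 'stabilityai': 'stability', 'stable': 'stability', 'stability ai': 'stability',
--     'luma': 'luma', 'lumaai': 'luma', 'luma ai': 'luma',
--     'ai21': 'ai21', 'ai21labs': 'ai21', 'ai21 labs': 'ai21',
--     'twelvelabs': 'twelvelabs', 'twelve labs': 'twelvelabs',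
--     'qwen': 'qwen',
--     'deepseek': 'deepseek',
--     'openai': 'openai',
--     'writer': 'writer',
-- }
--
--
-- def _providers_match(model_provider: str, pricing_provider: str) -> bool:
--     """Check if providers match (with some flexibility)"""
--     if model_provider == pricing_provider:
--         return True
--     canonical = _ALIAS_TO_CANONICAL.get(model_provider)
--     if canonical is None:
--         return False
--     return _ALIAS_TO_CANONICAL.get(pricing_provider) == canonical
-- ===== Notes on version B (the rewrite author's own statement) =====
-- stated objective: simpler
-- what changed: Replaces the per-call construction of the alias-group dict and the scan over every group's alias list with a module-level flat alias->canonical reverse map and two direct lookups compared for equality.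
import Mathlib
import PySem

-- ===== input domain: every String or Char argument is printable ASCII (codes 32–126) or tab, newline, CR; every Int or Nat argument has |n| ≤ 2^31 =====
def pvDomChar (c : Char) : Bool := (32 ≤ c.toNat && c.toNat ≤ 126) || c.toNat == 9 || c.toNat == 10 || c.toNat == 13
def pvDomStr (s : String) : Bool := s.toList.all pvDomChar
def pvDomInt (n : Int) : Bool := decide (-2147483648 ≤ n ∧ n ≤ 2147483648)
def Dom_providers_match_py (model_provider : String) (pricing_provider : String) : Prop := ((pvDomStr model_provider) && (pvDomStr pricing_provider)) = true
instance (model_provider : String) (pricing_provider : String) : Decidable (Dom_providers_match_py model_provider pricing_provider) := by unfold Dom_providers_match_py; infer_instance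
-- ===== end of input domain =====

-- B replaces A's per-call alias-group dict and group scan by a module-level flat
-- alias->canonical reverse map with two direct lookups (objective: simpler).

-- ===== PORT A =====
-- the items of A's `provider_aliases` dict literal, in insertion order
def providerAliases : List (String × List String) :=
  [("amazon", ["amazon", "aws"]),
   ("anthropic", ["anthropic"]),
   ("meta", ["meta", "facebook"]),
   ("cohere", ["cohere"]),
   ("mistral", ["mistral", "mistralai", "mistral ai"]),
   ("stability", ["stability", "stabilityai", "stable", "stability ai"]),
   ("luma", ["luma", "lumaai", "luma ai"]),
   ("ai21", ["ai21", "ai21labs", "ai21 labs"]),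
   ("twelvelabs", ["twelvelabs", "twelve labs", "twelvelabs"]),
   ("qwen", ["qwen"]),
   ("deepseek", ["deepseek"]),
   ("openai", ["openai"]),
   ("writer", ["writer"])]

-- the `for canonical, aliases in provider_aliases.items():` loop with early return
def scanAliases : List (String × List String) → String → String → Bool
  | [], _, _ => false
  | (_, al) :: rest, m, p =>
      if al.contains m && al.contains p then true else scanAliases rest m p

def providers_match_py (model_provider : String) (pricing_provider : String) : Bool :=
  if model_provider == pricing_provider then true
  else scanAliases providerAliases model_provider pricing_provider

-- ===== PORT B =====
-- B's module-level literal dict `_ALIAS_TO_CANONICAL`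
def aliasToCanonical : PySem.Dict String String :=
  PySem.Dict.mk
  [("amazon", "amazon"),
   ("aws", "amazon"),
   ("anthropic", "anthropic"),
   ("meta", "meta"),
   ("facebook", "meta"),
   ("cohere", "cohere"),
   ("mistral", "mistral"),
   ("mistralai", "mistral"),
   ("mistral ai", "mistral"),
   ("stability", "stability"),
   ("stabilityai", "stability"),
   ("stable", "stability"),
   ("stability ai", "stability"),
   ("luma", "luma"),
   ("lumaai", "luma"),
   ("luma ai", "luma"),
   ("ai21", "ai21"),
   ("ai21labs", "ai21"),
   ("ai21 labs", "ai21"),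
   ("twelvelabs", "twelvelabs"),
   ("twelve labs", "twelvelabs"),
   ("qwen", "qwen"),
   ("deepseek", "deepseek"),
   ("openai", "openai"),
   ("writer", "writer")]

def providers_match_py_alt (model_provider : String) (pricing_provider : String) : Bool :=
  if model_provider == pricing_provider then true
  else
    match PySem.Dict.get? aliasToCanonical model_provider with
    | none => false
    | some c => PySem.Dict.get? aliasToCanonical pricing_provider == some c

-- ===== PRECONDITION & SPEC =====
def Spec_providers_match_py (model_provider : String) (pricing_provider : String) (out : Bool) : Prop := out = providers_match_py_alt model_provider pricing_provider
instance (model_provider : String) (pricing_provider : String) (out : Bool) : Decidable (Spec_providers_match_py model_provider pricing_provider out) := by unfold Spec_providers_match_py; infer_instance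

-- ===== CLAIM (what is proved, stated in full; the proofs are below) =====
def Claim_equal_providers_match_py : Prop := ∀ (model_provider : String) (pricing_provider : String), Dom_providers_match_py model_provider pricing_provider → Spec_providers_match_py model_provider pricing_provider (providers_match_py model_provider pricing_provider)

-- ===== LEMMAS AND PROOFS =====

-- first-match lookup through the groups: the canonical name of the first group
-- whose alias list contains x
def lookG : List (String × List String) → String → Option String
  | [], _ => none
  | (c, al) :: rest, x => if al.contains x then some c else lookG rest x

-- x occurs in some group's alias list
def memAl (G : List (String × List String)) (x : String) : Bool :=
  G.any (fun g => g.2.contains x)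

-- well-formedness of the alias table: each canonical name is among its own
-- aliases, and alias lists of distinct groups are disjoint
def disjB : List (String × List String) → Bool
  | [] => true
  | (c, al) :: rest =>
      al.contains c && al.all (fun a => !memAl rest a) && disjB rest

lemma scan_false_left {G : List (String × List String)} {m p : String}
    (h : memAl G m = false) : scanAliases G m p = false := by
  induction G with
  | nil => rfl
  | cons g rest ih =>
      obtain ⟨c, al⟩ := g
      simp [memAl, List.any_cons] at h
      simp [scanAliases, h.1, ih (by simp [memAl, List.any_eq_false]; exact h.2)]

lemma scan_false_right {G : List (String × List String)} {m p : String}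
    (h : memAl G p = false) : scanAliases G m p = false := by
  induction G with
  | nil => rfl
  | cons g rest ih =>
      obtain ⟨c, al⟩ := g
      simp [memAl, List.any_cons] at h
      simp [scanAliases, h.1, ih (by simp [memAl, List.any_eq_false]; exact h.2)]

lemma lookG_mem {G : List (String × List String)} {x c : String}
    (hd : disjB G = true) (h : lookG G x = some c) : memAl G c = true := by
  induction G with
  | nil => simp [lookG] at h
  | cons g rest ih =>
      obtain ⟨c0, al⟩ := g
      simp [disjB, Bool.and_eq_true] at hd
      by_cases hx : x ∈ al
      · simp [lookG, hx] at h
        subst h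
        simp [memAl, List.any_cons, hd.1.1]
      · simp [lookG, hx] at h
        have := ih hd.2 h
        simp [memAl] at this ⊢
        exact Or.inr this

lemma scan_eq_look {G : List (String × List String)} (hd : disjB G = true) (m p : String) :
    scanAliases G m p =
      (match lookG G m with
       | none => false
       | some c => lookG G p == some c) := by
  induction G with
  | nil => rfl
  | cons g rest ih =>
      obtain ⟨c, al⟩ := g
      have hdm := hd
      simp [disjB, Bool.and_eq_true] at hdm
      have hd' : disjB rest = true := hdm.2
      have hcr : memAl rest c = false := hdm.1.2 c hdm.1.1
      by_cases hm : m ∈ al <;> by_cases hp : p ∈ al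
      · simp [scanAliases, lookG, hm, hp]
      · -- m in this group, p not: the scan of the remaining groups cannot fire
        have hmr : memAl rest m = false := hdm.1.2 m hm
        simp [scanAliases, lookG, hm, hp, scan_false_left hmr]
        cases hlp : lookG rest p with
        | none => simp
        | some c2 =>
            have hmem : memAl rest c2 = true := lookG_mem hd' hlp
            have hne : c2 ≠ c := fun he => by rw [he] at hmem; rw [hmem] at hcr; cases hcr
            simp [hne]
      · -- p in this group, m not
        have hpr : memAl rest p = false := hdm.1.2 p hp
        simp [scanAliases, lookG, hm, hp, scan_false_right hpr]
        cases hlm : lookG rest m with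
        | none => simp
        | some c2 =>
            have hmem : memAl rest c2 = true := lookG_mem hd' hlm
            have hne : c ≠ c2 := fun he => by rw [← he] at hmem; rw [hmem] at hcr; cases hcr
            simp [hne]
      · simp [scanAliases, lookG, hm, hp, ih hd']

lemma disj_providerAliases : disjB providerAliases = true := by decide

-- B's literal reverse dict looks up exactly the first-match group lookup
lemma get?_aliasToCanonical (x : String) :
    PySem.Dict.get? aliasToCanonical x = lookG providerAliases x := by
  by_cases h0 : x = "amazon"
  · subst h0; decide
  by_cases h1 : x = "aws"
  · subst h1; decide
  by_cases h2 : x = "anthropic"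
  · subst h2; decide
  by_cases h3 : x = "meta"
  · subst h3; decide
  by_cases h4 : x = "facebook"
  · subst h4; decide
  by_cases h5 : x = "cohere"
  · subst h5; decide
  by_cases h6 : x = "mistral"
  · subst h6; decide
  by_cases h7 : x = "mistralai"
  · subst h7; decide
  by_cases h8 : x = "mistral ai"
  · subst h8; decide
  by_cases h9 : x = "stability"
  · subst h9; decide
  by_cases h10 : x = "stabilityai"
  · subst h10; decide
  by_cases h11 : x = "stable"
  · subst h11; decide
  by_cases h12 : x = "stability ai"
  · subst h12; decide
  by_cases h13 : x = "luma"
  · subst h13; decide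
  by_cases h14 : x = "lumaai"
  · subst h14; decide
  by_cases h15 : x = "luma ai"
  · subst h15; decide
  by_cases h16 : x = "ai21"
  · subst h16; decide
  by_cases h17 : x = "ai21labs"
  · subst h17; decide
  by_cases h18 : x = "ai21 labs"
  · subst h18; decide
  by_cases h19 : x = "twelvelabs"
  · subst h19; decide
  by_cases h20 : x = "twelve labs"
  · subst h20; decide
  by_cases h21 : x = "qwen"
  · subst h21; decide
  by_cases h22 : x = "deepseek"
  · subst h22; decide
  by_cases h23 : x = "openai"
  · subst h23; decide
  by_cases h24 : x = "writer"
  · subst h24; decide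
  simp [aliasToCanonical, providerAliases, lookG, PySem.Dict.get?, h0, h1, h2, h3, h4, h5, h6, h7, h8, h9, h10, h11, h12, h13, h14, h15, h16, h17, h18, h19, h20, h21, h22, h23, h24, Ne.symm h0, Ne.symm h1, Ne.symm h2, Ne.symm h3, Ne.symm h4, Ne.symm h5, Ne.symm h6, Ne.symm h7, Ne.symm h8, Ne.symm h9, Ne.symm h10, Ne.symm h11, Ne.symm h12, Ne.symm h13, Ne.symm h14, Ne.symm h15, Ne.symm h16, Ne.symm h17, Ne.symm h18, Ne.symm h19, Ne.symm h20, Ne.symm h21, Ne.symm h22, Ne.symm h23, Ne.symm h24]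

-- ===== VERDICT (by name: the statement is the Claim_ definition above) =====
theorem providers_match_py_spec : Claim_equal_providers_match_py := by
  intro m p _
  unfold Spec_providers_match_py providers_match_py providers_match_py_alt
  by_cases h : m == p
  · simp [h]
  · simp only [h, if_false, Bool.false_eq_true]
    rw [scan_eq_look disj_providerAliases, get?_aliasToCanonical, get?_aliasToCanonical]
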